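-- pv_equiv track=rewrite | github.com/t3chn/football-lineup-bot | backend/app/services/lineup_predictor_optimized.py | _predict_formation_advanced
-- ===== SOURCE A (Python) =====
-- from collections import Counter, defaultdict
--
-- def _predict_formation_advanced(recent_lineups: list[dict], news_insights: dict) -> str:
--     """Predict formation using multiple signals"""
--
--     # Priority 1: Explicit formation in news
--     if news_insights.get("insights", {}).get("formation_hints"):
--         return news_insights["insights"]["formation_hints"]
--
--     # Priority 2: Most common recent formation
--     if recent_lineups:
--         formations = []
--         for lineup in recent_lineups:
--             if lineup.get("formation"):
--                 formations.append(lineup["formation"])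
--
--         if formations:
--             # Weight recent games more heavily
--             weighted_formations = []
--             for i, formation in enumerate(reversed(formations)):
--                 weight = len(formations) - i
--                 weighted_formations.extend([formation] * weight)
--
--             if weighted_formations:
--                 most_common = Counter(weighted_formations).most_common(1)
--                 if most_common:
--                     return most_common[0][0]
--
--     # Priority 3: Default based on league/team style
--     # Could be enhanced with team-specific defaults
--     return "4-3-3"
-- ===== SOURCE B (Python) =====
-- def _predict_formation_advanced(recent_lineups: list[dict], news_insights: dict) -> str:
--     """Predict formation using multiple signals (single-pass weighted tally)."""
--
--     # Priority 1: Explicit formation in news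
--     hint = news_insights.get("insights", {}).get("formation_hints")
--     if hint:
--         return hint
--
--     # Priority 2: accumulate each formation's total weight directly, one pass
--     # over the reversed lineups (most recent formation gets the largest weight),
--     # instead of materialising the weighted list and counting it.
--     n = sum(1 for lineup in recent_lineups if lineup.get("formation"))
--     weights = {}
--     i = 0
--     for lineup in reversed(recent_lineups):
--         formation = lineup.get("formation")
--         if formation:
--             weights[formation] = weights.get(formation, 0) + (n - i)
--             i += 1
--
--     # First key reaching the maximal weight wins (same tie-break as
--     # Counter(...).most_common(1) on the weighted list).
--     best = None
--     best_weight = 0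
--     for formation, weight in weights.items():
--         if weight > best_weight:
--             best, best_weight = formation, weight
--     return best if best is not None else "4-3-3"
-- ===== Notes on version B (the rewrite author's own statement) =====
-- stated objective: alternative
-- what changed: Instead of materialising the quadratic-size weighted formation list and counting it with Counter.most_common, B accumulates each formation's total weight in a dict in one pass over the reversed lineups and picks the first maximal entry with a linear scan.
import Mathlib
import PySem

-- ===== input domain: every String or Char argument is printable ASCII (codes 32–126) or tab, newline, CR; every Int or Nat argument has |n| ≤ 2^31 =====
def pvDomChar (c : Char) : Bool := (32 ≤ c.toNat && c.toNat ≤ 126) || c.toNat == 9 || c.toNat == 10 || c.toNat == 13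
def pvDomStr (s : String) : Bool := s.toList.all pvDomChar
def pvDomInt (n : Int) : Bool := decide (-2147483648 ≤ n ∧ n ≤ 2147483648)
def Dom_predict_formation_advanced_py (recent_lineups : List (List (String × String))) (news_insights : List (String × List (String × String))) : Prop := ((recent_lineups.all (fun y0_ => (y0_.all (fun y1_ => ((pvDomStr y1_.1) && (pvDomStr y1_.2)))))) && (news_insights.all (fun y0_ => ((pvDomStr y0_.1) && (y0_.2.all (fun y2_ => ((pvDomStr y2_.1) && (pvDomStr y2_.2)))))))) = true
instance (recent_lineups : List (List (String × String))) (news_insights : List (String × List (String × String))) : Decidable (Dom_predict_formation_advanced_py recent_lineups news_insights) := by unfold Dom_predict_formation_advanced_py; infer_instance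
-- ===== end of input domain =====

-- B replaces A's weighted-list + Counter.most_common with a one-pass dict of
-- per-formation weight sums and a first-maximum scan (objective: alternative algorithm).


-- ===== PORT A =====
-- Priorities 2 and 3 of A: collect formations, build the weighted list, count it.
def pvA_body (recent_lineups : List (List (String × String))) : String :=
  if recent_lineups ≠ [] then
    let formations := recent_lineups.foldl (fun acc lineup =>
      match (PySem.Dict.mk lineup).get? "formation" with
      | some f => if f ≠ "" then acc ++ [f] else acc
      | none => acc) []
    if formations ≠ [] then
      let weighted := (PySem.List.enumerate formations.reverse 0).foldl
        (fun acc p => acc ++ PySem.List.pyRepeat [p.2] ((formations.length : Int) - p.1)) []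
      if weighted ≠ [] then
        -- Counter(weighted).most_common(1): CPython's n = 1 path returns [max(items, key=itemgetter(1))]
        -- (the FIRST maximal item), i.e. PySem.List.max? of the counter's items.
        match PySem.List.max? (PySem.Dict.counter weighted).items (fun q => q.2) with
        | some m => m.1
        | none => "4-3-3"
      else "4-3-3"
    else "4-3-3"
  else "4-3-3"

def predict_formation_advanced_py (recent_lineups : List (List (String × String))) (news_insights : List (String × List (String × String))) : String :=
  match (PySem.Dict.mk ((PySem.Dict.mk news_insights).getD "insights" [])).get? "formation_hints" with
  | some h => if h ≠ "" then h else pvA_body recent_lineups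
  | none => pvA_body recent_lineups

-- ===== PORT B =====
-- One pass over the reversed lineups accumulating each formation's weight, then a linear max scan.
def pvB_tally (recent_lineups : List (List (String × String))) : String :=
  let n : Int := recent_lineups.foldl (fun acc lineup =>
      match (PySem.Dict.mk lineup).get? "formation" with
      | some f => if f ≠ "" then acc + 1 else acc
      | none => acc) 0
  let st := recent_lineups.reverse.foldl (fun (st : PySem.Dict String Int × Int) lineup =>
      match (PySem.Dict.mk lineup).get? "formation" with
      | some f => if f ≠ "" then (st.1.insert f (st.1.getD f 0 + (n - st.2)), st.2 + 1) else st
      | none => st) (PySem.Dict.empty, 0)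
  let best := st.1.items.foldl (fun (b : Option String × Int) q =>
      if q.2 > b.2 then (some q.1, q.2) else b) (none, 0)
  match best.1 with
  | some f => f
  | none => "4-3-3"

def predict_formation_advanced_py_alt (recent_lineups : List (List (String × String))) (news_insights : List (String × List (String × String))) : String :=
  match (PySem.Dict.mk ((PySem.Dict.mk news_insights).getD "insights" [])).get? "formation_hints" with
  | some h => if h ≠ "" then h else pvB_tally recent_lineups
  | none => pvB_tally recent_lineups

-- ===== PRECONDITION & SPEC =====
def Spec_predict_formation_advanced_py (recent_lineups : List (List (String × String))) (news_insights : List (String × List (String × String))) (out : String) : Prop := out = predict_formation_advanced_py_alt recent_lineups news_insights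
instance (recent_lineups : List (List (String × String))) (news_insights : List (String × List (String × String))) (out : String) : Decidable (Spec_predict_formation_advanced_py recent_lineups news_insights out) := by unfold Spec_predict_formation_advanced_py; infer_instance

-- ===== CLAIM (what is proved, stated in full; the proofs are below) =====
def Claim_equal_predict_formation_advanced_py : Prop := ∀ (recent_lineups : List (List (String × String))) (news_insights : List (String × List (String × String))), Dom_predict_formation_advanced_py recent_lineups news_insights → Spec_predict_formation_advanced_py recent_lineups news_insights (predict_formation_advanced_py recent_lineups news_insights)

-- ===== LEMMAS AND PROOFS =====

-- the value lineup.get("formation") contributes, if truthy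
def pvExt (lineup : List (String × String)) : Option String :=
  match (PySem.Dict.mk lineup).get? "formation" with
  | some f => if f ≠ "" then some f else none
  | none => none

theorem foldl_get_formation {β : Type} (g : β → String → β) (l : List (List (String × String))) (init : β) :
    l.foldl (fun acc lineup => match (PySem.Dict.mk lineup).get? "formation" with
      | some f => if f ≠ "" then g acc f else acc
      | none => acc) init
    = (l.filterMap pvExt).foldl g init := by
  induction l generalizing init with
  | nil => rfl
  | cons x t ih =>
    cases h : (PySem.Dict.mk x).get? "formation" with
    | none =>
      have hx : pvExt x = none := by simp [pvExt, h]
      simp only [List.foldl_cons, List.filterMap_cons, hx, h]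
      exact ih init
    | some f =>
      by_cases hf : f = ""
      · have hx : pvExt x = none := by simp [pvExt, h, hf]
        simp only [List.foldl_cons, List.filterMap_cons, hx, h, hf]
        rw [if_neg (by simp)]
        exact ih init
      · have hx : pvExt x = some f := by simp [pvExt, h, hf]
        simp only [List.foldl_cons, List.filterMap_cons, hx, h]
        rw [if_pos hf]
        exact ih (g init f)

theorem foldl_count_one (fs : List String) (a : Int) :
    fs.foldl (fun acc (_ : String) => acc + 1) a = a + fs.length := by
  induction fs generalizing a with
  | nil => simp
  | cons x t ih => simp [ih]; omega

theorem foldl_flatMap' {α β : Type} (g : α → List β) (f : γ → β → γ) (l : List α) (init : γ) :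
    (l.flatMap g).foldl f init = l.foldl (fun acc x => (g x).foldl f acc) init := by
  induction l generalizing init with
  | nil => rfl
  | cons x t ih => simp [List.flatMap_cons, List.foldl_append, ih]

theorem foldl_replicate_modify (k : Nat) (hk : 0 < k) (d : PySem.Dict String Int) (f : String) :
    (List.replicate k f).foldl (fun d x => d.modify x 0 (· + 1)) d
    = d.insert f (d.getD f 0 + (k : Int)) := by
  induction k generalizing d with
  | zero => omega
  | succ k ih =>
    rcases Nat.eq_zero_or_pos k with hk0 | hk0
    · subst hk0
      simp [List.replicate, PySem.Dict.modify]
    · have : (List.replicate (k+1) f) = f :: List.replicate k f := by simp [List.replicate]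
      rw [this, List.foldl_cons, ih hk0]
      simp [PySem.Dict.modify, PySem.Dict.insert_insert_self, PySem.Dict.getD_insert_self]
      ring_nf

theorem tally_eq (N : Int) (gs : List String) (d : PySem.Dict String Int) (i0 : Int)
    (h : i0 + gs.length ≤ N) :
    (PySem.List.enumerate gs i0).foldl
      (fun d p => (PySem.List.pyRepeat [p.2] (N - p.1)).foldl (fun d x => d.modify x 0 (· + 1)) d) d
    = (gs.foldl (fun st f => (st.1.insert f (st.1.getD f 0 + (N - st.2)), st.2 + 1)) (d, i0)).1 := by
  induction gs generalizing d i0 with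
  | nil => rfl
  | cons f t ih =>
    have hcons : PySem.List.enumerate (f :: t) i0 = (i0, f) :: PySem.List.enumerate t (i0 + 1) := rfl
    rw [hcons, List.foldl_cons, List.foldl_cons]
    have hpos : 0 < N - i0 := by simp at h; omega
    have hrep : PySem.List.pyRepeat [f] (N - i0) = List.replicate (N - i0).toNat f := by
      simp [PySem.List.pyRepeat_singleton]
    rw [hrep, foldl_replicate_modify _ (by omega) d f]
    have hcast : ((N - i0).toNat : Int) = N - i0 := Int.toNat_of_nonneg (by omega)
    rw [hcast]
    exact ih _ _ (by simp at h ⊢; omega)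

def pvPick (o : Option (String × Int)) : Option String × Int :=
  match o with
  | some r => (some r.1, r.2)
  | none => (none, 0)

theorem select_go (t : List (String × Int)) (m : String × Int) :
    t.foldl (fun b q => if q.2 > b.2 then (some q.1, q.2) else b) ((some m.1 : Option String), m.2)
    = pvPick (PySem.List.max? (m :: t) (fun q => q.2)) := by
  induction t generalizing m with
  | nil => rfl
  | cons x t ih =>
    by_cases hx : m.2 < x.2
    · have h1 : PySem.List.max? (m :: x :: t) (fun q => q.2)
          = PySem.List.max? (x :: t) (fun q => q.2) := by
        simp [PySem.List.max?, hx]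
      rw [List.foldl_cons, h1]
      simpa [hx, gt_iff_lt] using ih x
    · have h1 : PySem.List.max? (m :: x :: t) (fun q => q.2)
          = PySem.List.max? (m :: t) (fun q => q.2) := by
        simp [PySem.List.max?, hx]
      rw [List.foldl_cons, h1]
      simpa [hx, gt_iff_lt] using ih m

theorem select_eq (l : List (String × Int)) (hpos : ∀ p ∈ l, 0 < p.2) :
    l.foldl (fun b q => if q.2 > b.2 then (some q.1, q.2) else b) ((none : Option String), (0 : Int))
    = pvPick (PySem.List.max? l (fun q => q.2)) := by
  cases l with
  | nil => rfl
  | cons p t =>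
    have hp : 0 < p.2 := hpos p (by simp)
    rw [List.foldl_cons]
    have h1 : (if p.2 > ((none, 0) : Option String × Int).2 then ((some p.1 : Option String), p.2) else (none, 0))
        = ((some p.1 : Option String), p.2) := by simp [hp]
    rw [h1]
    exact select_go t p

theorem counter_items_pos (W : List String) :
    ∀ p ∈ (PySem.Dict.counter W).items, 0 < p.2 := by
  intro p hp
  rw [PySem.Dict.items_counter] at hp
  obtain ⟨k, hk, rfl⟩ := List.mem_map.mp hp
  have : k ∈ W := (PySem.Set.mem_ofList _ _).mp hk
  simp only []
  exact_mod_cast List.count_pos_iff.mpr this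

theorem body_eq (rl : List (List (String × String))) : pvA_body rl = pvB_tally rl := by
  unfold pvA_body pvB_tally
  dsimp only
  rw [foldl_get_formation (fun acc f => acc ++ [f]) rl []]
  rw [foldl_get_formation (fun (acc : Int) (_ : String) => acc + 1) rl 0]
  rw [foldl_get_formation
      (fun (st : PySem.Dict String Int × Int) f =>
        (st.1.insert f (st.1.getD f 0 +
          ((rl.filterMap pvExt).foldl (fun acc (_ : String) => acc + 1) 0 - st.2)), st.2 + 1))
      rl.reverse (PySem.Dict.empty, 0)]
  rw [PySem.List.foldl_append_singleton_eq_self]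
  set fs := rl.filterMap pvExt with hfs
  rw [List.nil_append, foldl_count_one fs 0, zero_add]
  rw [show rl.reverse.filterMap pvExt = fs.reverse from by simp [hfs]]
  by_cases hrl : rl = []
  · subst hrl; rfl
  · simp only [hrl, ne_eq, not_false_eq_true, if_true]
    by_cases hf : fs = []
    · rw [hf]; rfl
    · simp only [hf, not_false_eq_true, if_true]
      -- the weighted list and its counter
      rw [PySem.List.foldl_append_eq_flatMap, List.nil_append]
      set W := (PySem.List.enumerate fs.reverse 0).flatMap
        (fun p => PySem.List.pyRepeat [p.2] ((fs.length : Int) - p.1)) with hW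
      have hcounter : PySem.Dict.counter W
          = (fs.reverse.foldl (fun st f => (st.1.insert f (st.1.getD f 0 + ((fs.length : Int) - st.2)), st.2 + 1))
              (PySem.Dict.empty, (0 : Int))).1 := by
        rw [PySem.Dict.counter_eq_foldl, hW, foldl_flatMap']
        exact tally_eq (fs.length : Int) fs.reverse PySem.Dict.empty 0 (by simp)
      rw [← hcounter]
      rw [select_eq _ (counter_items_pos W)]
      by_cases hWnil : W = []
      · rw [hWnil]
        simp [PySem.Dict.counter, PySem.Dict.empty, PySem.List.max?, pvPick]
      · simp only [hWnil, not_false_eq_true, if_true]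
        cases hmax : PySem.List.max? (PySem.Dict.counter W).items (fun q => q.2) with
        | none => simp [pvPick]
        | some m => simp [pvPick]

-- ===== VERDICT (by name: the statement is the Claim_ definition above) =====
theorem predict_formation_advanced_py_spec : Claim_equal_predict_formation_advanced_py := by
  intro rl ni _
  unfold Spec_predict_formation_advanced_py predict_formation_advanced_py predict_formation_advanced_py_alt
  cases h : (PySem.Dict.mk ((PySem.Dict.mk ni).getD "insights" [])).get? "formation_hints" with
  | none => exact body_eq rl
  | some hh =>
    by_cases hne : hh = "" <;> simp [hne, body_eq rl]
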